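-- pv_equiv track=rewrite | github.com/MaratBY/content_detectron | contentDetectron/evaluation.py | merge_timestamps
-- ===== SOURCE A (Python) =====
-- def merge_timestamps(timestamps):
-- 	"""
-- 	The function merge_timestamps(timestamps).
-- 	Merges timestamps located in list if they are less than 2 seconds.
-- 	:param timestamps: timestamps
-- 	:return: list of merged timestamps
-- 	"""
-- 	result = []
-- 	i = 0
-- 	while i < len(timestamps):
-- 		(start, end) = timestamps[i]
-- 		if i < len(timestamps) - 1:
-- 			(start_next, end_next) = timestamps[i+1]
-- 			if abs(end - start_next) < 2:
-- 				result.append((start, end_next))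
-- 				i+=1
-- 			else:
-- 				result.append((start, end))
-- 		else:
-- 			result.append((start, end))
-- 		i+=1
-- 	return result
-- ===== SOURCE B (Python) =====
-- def merge_timestamps(timestamps):
--     result = []
--     pending = None
--     for (start, end) in timestamps:
--         if pending is None:
--             pending = (start, end)
--         elif abs(pending[1] - start) < 2:
--             result.append((pending[0], end))
--             pending = None
--         else:
--             result.append(pending)
--             pending = (start, end)
--     if pending is not None:
--         result.append(pending)
--     return result
-- ===== Notes on version B (the rewrite author's own statement) =====
-- stated objective: simpler
-- what changed: Replaced the index-based while loop with lookahead (timestamps[i], timestamps[i+1]) by a single for-loop over the elements that carries a 'pending' unmerged timestamp, appending it when the next element is too far or at the end.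
import Mathlib
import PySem

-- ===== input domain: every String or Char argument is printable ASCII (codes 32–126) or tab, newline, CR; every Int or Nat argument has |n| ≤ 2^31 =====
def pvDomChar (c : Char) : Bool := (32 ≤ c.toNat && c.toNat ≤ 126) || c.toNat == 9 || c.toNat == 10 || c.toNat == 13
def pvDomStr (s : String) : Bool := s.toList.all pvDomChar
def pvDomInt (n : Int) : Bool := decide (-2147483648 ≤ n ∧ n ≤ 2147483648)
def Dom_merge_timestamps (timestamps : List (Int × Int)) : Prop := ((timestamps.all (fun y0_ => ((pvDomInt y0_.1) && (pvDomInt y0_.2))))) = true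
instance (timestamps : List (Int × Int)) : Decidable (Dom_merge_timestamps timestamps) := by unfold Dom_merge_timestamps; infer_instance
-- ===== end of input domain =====

-- B replaces A's index-lookahead while loop by a for-loop carrying a 'pending' timestamp (simpler decomposition, same greedy pairwise merge).

-- ===== PORT A =====
-- A's while loop with index i: reads timestamps[i] and, if it exists, timestamps[i+1];
-- merges when |end - start_next| < 2 (then skips both), else emits the current pair.
-- Transcribed as structural recursion over the same suffix the index points at.
def merge_timestamps (timestamps : List (Int × Int)) : List (Int × Int) :=
  match timestamps with
  | [] => []
  | [(s, e)] => [(s, e)]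
  | (s, e) :: (sn, en) :: rest =>
    if |e - sn| < 2 then (s, en) :: merge_timestamps rest
    else (s, e) :: merge_timestamps ((sn, en) :: rest)

-- ===== PORT B =====
-- B's loop body: state is (result so far, pending timestamp or none).
def mtB_step (st : List (Int × Int) × Option (Int × Int)) (x : Int × Int) :
    List (Int × Int) × Option (Int × Int) :=
  match st.2 with
  | none => (st.1, some x)
  | some p => if |p.2 - x.1| < 2 then (st.1 ++ [(p.1, x.2)], none)
              else (st.1 ++ [p], some x)

def merge_timestamps_alt (timestamps : List (Int × Int)) : List (Int × Int) :=
  let st := timestamps.foldl mtB_step ([], none)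
  match st.2 with
  | none => st.1
  | some p => st.1 ++ [p]

-- ===== PRECONDITION & SPEC =====
def Spec_merge_timestamps (timestamps : List (Int × Int)) (out : List (Int × Int)) : Prop := out = merge_timestamps_alt timestamps
instance (timestamps : List (Int × Int)) (out : List (Int × Int)) : Decidable (Spec_merge_timestamps timestamps out) := by unfold Spec_merge_timestamps; infer_instance

-- ===== CLAIM (what is proved, stated in full; the proofs are below) =====
def Claim_equal_merge_timestamps : Prop := ∀ (timestamps : List (Int × Int)), Dom_merge_timestamps timestamps → Spec_merge_timestamps timestamps (merge_timestamps timestamps)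

-- ===== LEMMAS AND PROOFS =====

-- what B's loop still owes, given the current pending value: exactly A's result on pending :: xs (or on xs when no pending)
def mtRest (pending : Option (Int × Int)) (xs : List (Int × Int)) : List (Int × Int) :=
  match pending with
  | none => merge_timestamps xs
  | some p => merge_timestamps (p :: xs)

theorem mtB_invariant (xs : List (Int × Int)) :
    ∀ (res : List (Int × Int)) (pending : Option (Int × Int)),
      (match (xs.foldl mtB_step (res, pending)).2 with
       | none => (xs.foldl mtB_step (res, pending)).1
       | some p => (xs.foldl mtB_step (res, pending)).1 ++ [p]) =
      res ++ mtRest pending xs := by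
  induction xs with
  | nil =>
    intro res pending
    cases pending with
    | none => simp [mtRest, merge_timestamps]
    | some p => simp [mtRest, merge_timestamps]
  | cons x rest ih =>
    intro res pending
    cases pending with
    | none =>
      simpa [mtB_step, mtRest] using ih res (some x)
    | some p =>
      by_cases h : |p.2 - x.1| < 2
      · have := ih (res ++ [(p.1, x.2)]) none
        simp only [List.foldl_cons, mtB_step, if_pos h] at *
        rw [this]
        cases rest with
        | nil => simp [mtRest, merge_timestamps, h]
        | cons y ys => simp [mtRest, merge_timestamps, h]
    -- no merge: pending is emitted and x becomes pending
      · have := ih (res ++ [p]) (some x)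
        simp only [List.foldl_cons, mtB_step, if_neg h] at *
        rw [this]
        cases rest with
        | nil => simp [mtRest, merge_timestamps, h]
        | cons y ys => simp [mtRest, merge_timestamps, h]

-- ===== VERDICT (by name: the statement is the Claim_ definition above) =====
theorem merge_timestamps_spec : Claim_equal_merge_timestamps := by
  intro ts _
  unfold Spec_merge_timestamps merge_timestamps_alt
  simpa [mtRest] using (mtB_invariant ts [] none).symm
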